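-- pv_equiv track=rewrite | github.com/trilinos/Trilinos | packages/rol/refactor/parameterlist.py | contains_escaped_quote_advanced
-- ===== SOURCE A (Python) =====
-- def contains_escaped_quote_advanced(s: str) -> bool:
--     i = 0
--     while i < len(s):
--         if s[i] == '\\':
--             backslash_count = 1
--             i += 1
--
--             # Count consecutive backslashes
--             while i < len(s) and s[i] == '\\':
--                 backslash_count += 1
--                 i += 1
--
--             # If there's an odd number of backslashes followed by a quote, then it is escaped
--             if i < len(s) and s[i] == '"' and backslash_count % 2 == 1:
--                 return True
--         else:
--             i += 1
--     return False
-- ===== SOURCE B (Python) =====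
-- def contains_escaped_quote_advanced(s: str) -> bool:
--     escaped = False  # parity of the backslash run ending just before the current char
--     for c in s:
--         if c == '"' and escaped:
--             return True
--         escaped = (not escaped) if c == '\\' else False
--     return False
-- ===== Notes on version B (the rewrite author's own statement) =====
-- stated objective: simpler
-- what changed: Replaced the nested index-based while loops (inner loop counting each backslash run, then a lookahead check) by one flat pass over the characters maintaining a single run-parity flag.
import Mathlib
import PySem

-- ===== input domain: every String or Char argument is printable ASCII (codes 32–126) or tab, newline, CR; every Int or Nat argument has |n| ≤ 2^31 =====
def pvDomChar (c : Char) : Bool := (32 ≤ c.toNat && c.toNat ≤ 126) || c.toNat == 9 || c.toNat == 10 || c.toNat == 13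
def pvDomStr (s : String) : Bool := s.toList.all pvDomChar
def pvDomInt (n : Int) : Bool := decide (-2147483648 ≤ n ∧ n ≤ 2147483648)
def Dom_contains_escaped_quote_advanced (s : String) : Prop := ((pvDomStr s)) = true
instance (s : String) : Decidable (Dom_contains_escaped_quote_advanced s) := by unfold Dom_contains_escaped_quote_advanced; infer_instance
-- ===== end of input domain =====

-- B replaces A's nested while loops (inner backslash-run counter + lookahead) by one
-- flat pass keeping a single parity flag; objective: simpler.

-- ===== PORT A =====
-- outer while loop / inner backslash-counting loop of A, as mutual recursion over the
-- remaining characters; pvRunA cnt l is the state inside the inner loop with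
-- backslash_count = cnt.  After the inner loop stops at a non-backslash char c, A either
-- returns True (c = '"' and cnt odd) or falls back to the outer loop, which (c ≠ '\\')
-- just advances past c.
mutual
def pvLoopA : List Char → Bool
  | [] => false
  | c :: rest => if c = '\\' then pvRunA 1 rest else pvLoopA rest
def pvRunA (cnt : Nat) : List Char → Bool
  | [] => false
  | c :: rest =>
      if c = '\\' then pvRunA (cnt + 1) rest
      else if c = '"' ∧ cnt % 2 = 1 then true
      else pvLoopA rest
end

def contains_escaped_quote_advanced (s : String) : Bool := pvLoopA s.toList

-- ===== PORT B =====
-- single pass with a parity flag, as in Source B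
def pvLoopB (escaped : Bool) : List Char → Bool
  | [] => false
  | c :: rest =>
      if c = '"' && escaped then true
      else pvLoopB (if c = '\\' then !escaped else false) rest

def contains_escaped_quote_advanced_alt (s : String) : Bool := pvLoopB false s.toList

-- ===== PRECONDITION & SPEC =====
def Spec_contains_escaped_quote_advanced (s : String) (out : Bool) : Prop := out = contains_escaped_quote_advanced_alt s
instance (s : String) (out : Bool) : Decidable (Spec_contains_escaped_quote_advanced s out) := by unfold Spec_contains_escaped_quote_advanced; infer_instance

-- ===== CLAIM (what is proved, stated in full; the proofs are below) =====
def Claim_equal_contains_escaped_quote_advanced : Prop := ∀ (s : String), Dom_contains_escaped_quote_advanced s → Spec_contains_escaped_quote_advanced s (contains_escaped_quote_advanced s)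

-- ===== LEMMAS AND PROOFS =====

lemma pv_loop_eq (l : List Char) :
    pvLoopA l = pvLoopB false l ∧ ∀ cnt, pvRunA cnt l = pvLoopB (decide (cnt % 2 = 1)) l := by
  induction l with
  | nil => simp [pvLoopA, pvRunA, pvLoopB]
  | cons c rest ih =>
    constructor
    · by_cases h : c = '\\'
      · simp [pvLoopA, pvLoopB, h, (ih.2 1)]
      · by_cases hq : c = '"'
        · simp [pvLoopA, pvLoopB, hq, ih.1]
        · simp [pvLoopA, pvLoopB, h, hq, ih.1]
    · intro cnt
      by_cases h : c = '\\'
      · have hpar : decide ((cnt + 1) % 2 = 1) = !decide (cnt % 2 = 1) := by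
          by_cases ho : cnt % 2 = 1 <;> simp [ho] <;> omega
        simp [pvRunA, pvLoopB, h, ih.2 (cnt + 1), hpar]
      · by_cases hq : c = '"'
        · by_cases ho : cnt % 2 = 1
          · simp [pvRunA, pvLoopB, hq, ho]
          · simp [pvRunA, pvLoopB, hq, ho, ih.1]
        · simp [pvRunA, pvLoopB, h, hq, ih.1]

-- ===== VERDICT =====
theorem contains_escaped_quote_advanced_spec : Claim_equal_contains_escaped_quote_advanced := by
  intro s _
  unfold Spec_contains_escaped_quote_advanced contains_escaped_quote_advanced contains_escaped_quote_advanced_alt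
  exact (pv_loop_eq s.toList).1
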